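-- pv_equiv track=rewrite | github.com/rasakereh/my_DataStructure_practice | sudoku_solver/sudoku.py | unique_true
-- ===== SOURCE A (Python) =====
-- def unique_true(arr):
-- 	result = -1
-- 	for i in range(len(arr)):
-- 		if arr[i]:
-- 			if result != -1:
-- 				return -1
-- 			else:
-- 				result = i
--
-- 	return result
-- ===== SOURCE B (Python) =====
-- def unique_true(arr):
--     hits = [i for i, x in enumerate(arr) if x]
--     return hits[0] if len(hits) == 1 else -1
-- ===== Notes on version B (the rewrite author's own statement) =====
-- stated objective: simpler
-- what changed: Replaces A's single-slot accumulator loop with early return by gathering all truthy indices into a list and deciding from its length.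
import Mathlib
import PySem

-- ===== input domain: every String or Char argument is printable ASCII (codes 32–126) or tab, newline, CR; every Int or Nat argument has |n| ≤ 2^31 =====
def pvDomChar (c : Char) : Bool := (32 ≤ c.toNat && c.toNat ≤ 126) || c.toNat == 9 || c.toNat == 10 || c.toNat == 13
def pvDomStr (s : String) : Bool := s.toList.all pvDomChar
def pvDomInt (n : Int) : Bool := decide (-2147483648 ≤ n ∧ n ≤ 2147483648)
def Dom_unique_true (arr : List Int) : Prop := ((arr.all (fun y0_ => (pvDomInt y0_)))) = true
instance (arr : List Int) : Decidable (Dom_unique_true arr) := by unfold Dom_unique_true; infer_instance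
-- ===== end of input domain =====

-- B gathers all truthy indices into a list and decides from its length, replacing A's
-- single-slot accumulator with early return; objective: simpler.


-- ===== PORT A =====
-- loop over the elements carrying the index i and the slot `result`; early return -1 on a
-- second truthy element
def uniqueTrueGo (xs : List Int) (i : Int) (result : Int) : Int :=
  match xs with
  | [] => result
  | x :: rest =>
      if x ≠ 0 then
        if result ≠ -1 then -1
        else uniqueTrueGo rest (i + 1) i
      else uniqueTrueGo rest (i + 1) result

def unique_true (arr : List Int) : Int := uniqueTrueGo arr 0 (-1)

-- ===== PORT B =====
def unique_true_alt (arr : List Int) : Int :=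
  let hits : List Int := ((PySem.List.enumerate arr).filter (fun p => p.2 ≠ 0)).map (fun p => p.1)
  if hits.length = 1 then hits.headD (-1) else -1

-- ===== PRECONDITION & SPEC =====
def Spec_unique_true (arr : List Int) (out : Int) : Prop := out = unique_true_alt arr
instance (arr : List Int) (out : Int) : Decidable (Spec_unique_true arr out) := by unfold Spec_unique_true; infer_instance

-- ===== CLAIM (what is proved, stated in full; the proofs are below) =====
def Claim_equal_unique_true : Prop := ∀ (arr : List Int), Dom_unique_true arr → Spec_unique_true arr (unique_true arr)

-- ===== LEMMAS AND PROOFS =====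

-- the list of truthy indices of xs, indexing from i (B's `hits` on a suffix)
def truthyIdx (xs : List Int) (i : Int) : List Int :=
  ((PySem.List.enumerate xs i).filter (fun p => p.2 ≠ 0)).map (fun p => p.1)

theorem truthyIdx_nil (i : Int) : truthyIdx [] i = [] := by
  simp [truthyIdx, PySem.List.enumerate_nil]

theorem truthyIdx_cons (x : Int) (xs : List Int) (i : Int) :
    truthyIdx (x :: xs) i =
      if x ≠ 0 then i :: truthyIdx xs (i + 1) else truthyIdx xs (i + 1) := by
  simp only [truthyIdx, PySem.List.enumerate_cons, List.filter_cons]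
  by_cases h : x = 0 <;> simp [h]

-- once the slot is filled (r ≠ -1), A returns r iff no further truthy element occurs
theorem go_filled (xs : List Int) (i r : Int) (hr : r ≠ -1) :
    uniqueTrueGo xs i r = if truthyIdx xs i = [] then r else -1 := by
  induction xs generalizing i with
  | nil => simp [uniqueTrueGo, truthyIdx_nil]
  | cons x rest ih =>
      rw [truthyIdx_cons]
      by_cases hx : x = 0
      · simp [uniqueTrueGo, hx, ih (i + 1)]
      · simp [uniqueTrueGo, hx, hr]

-- with the slot empty, A's answer is determined by the truthy-index list
theorem go_empty (xs : List Int) (i : Int) (hi : 0 ≤ i) :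
    uniqueTrueGo xs i (-1) =
      match truthyIdx xs i with
      | [] => -1
      | j :: rest => if rest = [] then j else -1 := by
  induction xs generalizing i with
  | nil => simp [uniqueTrueGo, truthyIdx_nil]
  | cons x rest ih =>
      rw [truthyIdx_cons]
      by_cases hx : x = 0
      · simpa [uniqueTrueGo, hx] using ih (i + 1) (by omega)
      · have hi' : i ≠ -1 := by omega
        simp only [uniqueTrueGo, hx, ne_eq, not_false_iff, if_pos trivial]
        rw [go_filled rest (i + 1) i hi']
        by_cases h : truthyIdx rest (i + 1) = []
        · simp [h]
        · cases hlist : truthyIdx rest (i + 1) <;> simp_all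

-- ===== VERDICT (by name: the statement is the Claim_ definition above) =====
theorem unique_true_spec : Claim_equal_unique_true := by
  intro arr _
  show unique_true arr = unique_true_alt arr
  rw [unique_true, go_empty arr 0 le_rfl, unique_true_alt]
  show _ = (if (truthyIdx arr 0).length = 1 then (truthyIdx arr 0).headD (-1) else -1)
  cases h : truthyIdx arr 0 with
  | nil => simp
  | cons j rest => cases rest <;> simp
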